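-- pv_equiv track=rewrite | github.com/Barmagloth/Curiosity | experiments/exp12a_tau_parent/exp12a_tau_parent.py | _subtree_nodes
-- ===== SOURCE A (Python) =====
-- def _subtree_nodes(root, n_nodes):
--     nodes = []
--     q = [root]
--     while q:
--         curr = q.pop()
--         if curr >= n_nodes:
--             continue
--         nodes.append(curr)
--         left = 2 * curr + 1
--         right = 2 * curr + 2
--         if left < n_nodes:
--             q.append(left)
--         if right < n_nodes:
--             q.append(right)
--     return nodes
-- ===== SOURCE B (Python) =====
-- def _subtree_nodes(root, n_nodes):
--     def rec(curr):
--         if curr < 0 or curr >= n_nodes: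
--             return []
--         return [curr] + rec(2 * curr + 2) + rec(2 * curr + 1)
--     return rec(root)
-- ===== Notes on version B (the rewrite author's own statement) =====
-- stated objective: simpler
-- what changed: Replaces the explicit stack-driven while loop with direct structural recursion (right child first, then left) that builds the list by concatenation, matching the stack's LIFO pop order.
import Mathlib
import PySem

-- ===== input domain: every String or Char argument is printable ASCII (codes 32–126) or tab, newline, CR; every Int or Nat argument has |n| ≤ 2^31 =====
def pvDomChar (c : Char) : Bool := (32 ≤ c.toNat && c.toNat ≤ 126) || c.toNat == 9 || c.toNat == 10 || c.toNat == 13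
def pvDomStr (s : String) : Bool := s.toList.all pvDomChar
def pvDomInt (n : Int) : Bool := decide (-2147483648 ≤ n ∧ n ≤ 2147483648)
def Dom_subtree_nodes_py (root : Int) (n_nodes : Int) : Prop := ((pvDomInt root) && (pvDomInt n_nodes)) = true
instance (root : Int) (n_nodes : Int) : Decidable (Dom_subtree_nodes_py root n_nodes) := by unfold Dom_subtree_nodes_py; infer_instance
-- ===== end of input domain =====

-- B replaces A's explicit-stack DFS loop with direct right-then-left recursion building the list by concatenation (objective: simpler).

-- ===== PORT A =====
-- weight used only for the termination measure of the while loop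
def pvW (n c : Int) : Nat := 3 ^ (n - c).toNat

theorem pvW_pos (n c : Int) : 0 < pvW n c := Nat.pow_pos (by norm_num)

theorem pvW_two_children (n c : Int) (h0 : 0 ≤ c) (h1 : c < n) :
    pvW n (2 * c + 2) + pvW n (2 * c + 1) < pvW n c := by
  unfold pvW
  have hk : 1 ≤ (n - c).toNat := by omega
  have h2 : (n - (2 * c + 2)).toNat ≤ (n - c).toNat - 1 := by omega
  have h3 : (n - (2 * c + 1)).toNat ≤ (n - c).toNat - 1 := by omega
  have b2 : 3 ^ (n - (2 * c + 2)).toNat ≤ 3 ^ ((n - c).toNat - 1) :=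
    Nat.pow_le_pow_right (by norm_num) h2
  have b3 : 3 ^ (n - (2 * c + 1)).toNat ≤ 3 ^ ((n - c).toNat - 1) :=
    Nat.pow_le_pow_right (by norm_num) h3
  have hp : 0 < 3 ^ ((n - c).toNat - 1) := Nat.pow_pos (by norm_num)
  have he : 3 ^ (n - c).toNat = 3 ^ ((n - c).toNat - 1) * 3 := by
    rw [← pow_succ]; congr 1; omega
  omega

-- literal port of A's while loop; head of the list is the top of the Python stack
-- (the 'curr < 0' branch is a totality guard only: inputs reaching it with curr < n_nodes
--  make the Python loop diverge and lie outside Pre_)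
def loopA (n : Int) (q : List Int) (nodes : List Int) : List Int :=
  match q with
  | [] => nodes
  | curr :: q' =>
    if curr < 0 then loopA n q' nodes
    else if n ≤ curr then loopA n q' nodes
    else loopA n ((if 2 * curr + 2 < n then [2 * curr + 2] else []) ++
                  (if 2 * curr + 1 < n then [2 * curr + 1] else []) ++ q')
                 (nodes ++ [curr])
termination_by (q.map (pvW n)).sum
decreasing_by
  · have := pvW_pos n curr; simp [List.sum_cons]; omega
  · have := pvW_pos n curr; simp [List.sum_cons]; omega
  · rename_i h0 h1
    have h0' : 0 ≤ curr := by omega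
    have h1' : curr < n := by omega
    have key := pvW_two_children n curr h0' h1'
    have pr := pvW_pos n (2 * curr + 2)
    have pl := pvW_pos n (2 * curr + 1)
    simp [List.sum_append, List.sum_cons]
    split_ifs <;> simp [List.sum_cons] <;> omega

def subtree_nodes_py (root : Int) (n_nodes : Int) : List Int :=
  loopA n_nodes [root] []

-- ===== PORT B =====
def recB (n : Int) (curr : Int) : List Int :=
  if curr < 0 ∨ n ≤ curr then []
  else curr :: (recB n (2 * curr + 2) ++ recB n (2 * curr + 1))
termination_by (n - curr).toNat
decreasing_by all_goals (simp only [not_or, not_lt, not_le] at *; omega)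

def subtree_nodes_py_alt (root : Int) (n_nodes : Int) : List Int :=
  recB n_nodes root

-- ===== PRECONDITION & SPEC =====
-- Pre_ excludes negative roots below n_nodes: there the Python loop re-pushes children forever and A diverges.
def Pre_subtree_nodes_py (root : Int) (n_nodes : Int) : Prop := 0 ≤ root ∨ n_nodes ≤ root
instance (root : Int) (n_nodes : Int) : Decidable (Pre_subtree_nodes_py root n_nodes) := by unfold Pre_subtree_nodes_py; infer_instance
def pvWitness_subtree_nodes_py : Int × Int := (0, 7)

def Spec_subtree_nodes_py (root : Int) (n_nodes : Int) (out : List Int) : Prop := out = subtree_nodes_py_alt root n_nodes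
instance (root : Int) (n_nodes : Int) (out : List Int) : Decidable (Spec_subtree_nodes_py root n_nodes out) := by unfold Spec_subtree_nodes_py; infer_instance

-- ===== CLAIM (what is proved, stated in full; the proofs are below) =====
def Claim_equal_subtree_nodes_py : Prop := ∀ (root : Int) (n_nodes : Int), Dom_subtree_nodes_py root n_nodes → Pre_subtree_nodes_py root n_nodes → Spec_subtree_nodes_py root n_nodes (subtree_nodes_py root n_nodes)

-- ===== LEMMAS AND PROOFS =====
theorem loop_spec (n curr : Int) (q nodes : List Int) (h : 0 ≤ curr) :
    loopA n (curr :: q) nodes = loopA n q (nodes ++ recB n curr) := by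
  rw [loopA, recB]
  have h' : ¬ curr < 0 := not_lt.mpr h
  by_cases hn : n ≤ curr
  · simp [h', hn]
  · have hcn : curr < n := not_le.mp hn
    simp only [if_neg h', if_neg hn, if_neg (by tauto : ¬ (curr < 0 ∨ n ≤ curr))]
    by_cases hr : 2 * curr + 2 < n
    · have hl : 2 * curr + 1 < n := by omega
      simp only [if_pos hr, if_pos hl, List.cons_append, List.nil_append]
      rw [loop_spec n (2 * curr + 2) _ _ (by linarith),
          loop_spec n (2 * curr + 1) _ _ (by linarith)]
      simp [List.append_assoc]
    · have er : recB n (2 * curr + 2) = [] := by rw [recB]; simp; omega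
      by_cases hl : 2 * curr + 1 < n
      · simp only [if_neg hr, if_pos hl, List.nil_append, List.cons_append]
        rw [loop_spec n (2 * curr + 1) _ _ (by linarith)]
        simp [er, List.append_assoc]
      · have el : recB n (2 * curr + 1) = [] := by rw [recB]; simp; omega
        simp [hr, hl, er, el]
termination_by (n - curr).toNat
decreasing_by all_goals omega

-- ===== VERDICT (by name: the statement is the Claim_ definition above) =====
theorem subtree_nodes_py_spec : Claim_equal_subtree_nodes_py := by
  intro root n _ hpre
  unfold Spec_subtree_nodes_py subtree_nodes_py subtree_nodes_py_alt
  by_cases h : 0 ≤ root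
  · rw [loop_spec n root [] [] h, loopA]; simp
  · have hn : n ≤ root := by rcases hpre with h' | h' <;> omega
    rw [loopA, recB]
    simp [show root < 0 by omega]
    rw [loopA]
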